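-- pv_equiv track=rewrite | github.com/globalwetlands/Depth-Anything-V2 | streamlit/scripts/tnc/annotations.py | count_sequences_and_get_current_sequence
-- ===== SOURCE A (Python) =====
-- def count_sequences_and_get_current_sequence(frames, current_index):
--     """
--     Count the number of sequences and identify the current sequence number.
--
--     Args:
--         frames (list): List of frame numbers.
--         current_index (int): Current frame index.
--
--     Returns:
--         tuple: Total number of sequences and the current sequence number.
--     """
--     sequences = 1
--     sequence_indices = [0]  # Start of each sequence
--     for i in range(1, len(frames)):
--         if frames[i] != frames[i - 1] and frames[i] != frames[i - 1] + 1: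
--             sequences += 1
--             sequence_indices.append(i)
--
--     # Determine the current sequence number
--     current_sequence = 1
--     for i in range(1, len(sequence_indices)):
--         if current_index >= sequence_indices[i]:
--             current_sequence = i + 1
--         else:
--             break
--
--     return sequences, current_sequence
-- ===== SOURCE B (Python) =====
-- def count_sequences_and_get_current_sequence(frames, current_index):
--     """Single fused pass: count sequence breaks and, at each break at index i,
--     bump the current-sequence counter iff i <= current_index (starts are increasing)."""
--     sequences = 1
--     current_sequence = 1
--     for i in range(1, len(frames)):
--         if frames[i] != frames[i - 1] and frames[i] != frames[i - 1] + 1: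
--             sequences += 1
--             if i <= current_index:
--                 current_sequence += 1
--     return sequences, current_sequence
-- ===== Notes on version B (the rewrite author's own statement) =====
-- stated objective: simpler
-- what changed: Fused A's two loops into one pass that never materializes the sequence-start list: at each break index i the current-sequence counter is bumped inline iff i <= current_index, which is valid because starts are strictly increasing.
import Mathlib
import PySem

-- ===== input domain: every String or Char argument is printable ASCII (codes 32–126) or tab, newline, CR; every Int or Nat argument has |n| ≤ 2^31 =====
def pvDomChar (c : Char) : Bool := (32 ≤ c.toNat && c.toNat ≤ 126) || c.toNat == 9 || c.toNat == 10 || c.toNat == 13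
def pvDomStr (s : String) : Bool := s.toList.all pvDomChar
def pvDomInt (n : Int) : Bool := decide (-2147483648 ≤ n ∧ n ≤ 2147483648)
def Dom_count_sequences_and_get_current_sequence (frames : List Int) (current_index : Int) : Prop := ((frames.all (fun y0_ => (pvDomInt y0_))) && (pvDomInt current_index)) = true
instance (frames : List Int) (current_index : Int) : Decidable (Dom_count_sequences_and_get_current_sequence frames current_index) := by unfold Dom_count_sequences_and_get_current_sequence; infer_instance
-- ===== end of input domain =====

-- B fuses A's two loops into one pass that keeps only two counters (no start-index list);
-- objective: simpler (O(1) extra space), same asymptotic time.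


-- ===== PORT A =====
-- first loop of A: builds (sequences, sequence_indices)
def csA_loop1 (frames : List Int) : Int × List Int :=
  (PySem.List.pyRange 1 (frames.length : Int) 1).foldl
    (fun st i =>
      if PySem.List.pyGetD frames i 0 ≠ PySem.List.pyGetD frames (i - 1) 0 ∧
         PySem.List.pyGetD frames i 0 ≠ PySem.List.pyGetD frames (i - 1) 0 + 1 then
        (st.1 + 1, st.2 ++ [i])
      else st)
    (1, [0])

-- second loop of A ('for i in range(1, len(sequence_indices)) … else break'), as a
-- recursion over the tail of sequence_indices with position counter k and accumulator cs
def csA_loop2 (ci : Int) : List Int → Int → Int → Int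
  | [], _, cs => cs
  | s :: rest, k, cs => if ci ≥ s then csA_loop2 ci rest (k + 1) (k + 1) else cs

def count_sequences_and_get_current_sequence (frames : List Int) (current_index : Int) : Int × Int :=
  let r := csA_loop1 frames
  (r.1, csA_loop2 current_index (r.2.drop 1) 1 1)

-- ===== PORT B =====
def count_sequences_and_get_current_sequence_alt (frames : List Int) (current_index : Int) : Int × Int :=
  (PySem.List.pyRange 1 (frames.length : Int) 1).foldl
    (fun st i =>
      if PySem.List.pyGetD frames i 0 ≠ PySem.List.pyGetD frames (i - 1) 0 ∧
         PySem.List.pyGetD frames i 0 ≠ PySem.List.pyGetD frames (i - 1) 0 + 1 then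
        (st.1 + 1, if i ≤ current_index then st.2 + 1 else st.2)
      else st)
    (1, 1)

-- ===== PRECONDITION & SPEC =====
def Spec_count_sequences_and_get_current_sequence (frames : List Int) (current_index : Int) (out : Int × Int) : Prop := out = count_sequences_and_get_current_sequence_alt frames current_index
instance (frames : List Int) (current_index : Int) (out : Int × Int) : Decidable (Spec_count_sequences_and_get_current_sequence frames current_index out) := by unfold Spec_count_sequences_and_get_current_sequence; infer_instance

-- ===== CLAIM (what is proved, stated in full; the proofs are below) =====
def Claim_equal_count_sequences_and_get_current_sequence : Prop := ∀ (frames : List Int) (current_index : Int), Dom_count_sequences_and_get_current_sequence frames current_index → Spec_count_sequences_and_get_current_sequence frames current_index (count_sequences_and_get_current_sequence frames current_index)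

-- ===== LEMMAS AND PROOFS =====

-- if the loop never breaks, csA_loop2 returns k + length
theorem csA_loop2_all (ci : Int) (t : List Int) (k : Int)
    (h : ∀ s ∈ t, ci ≥ s) : csA_loop2 ci t k k = k + (t.length : Int) := by
  induction t generalizing k with
  | nil => simp [csA_loop2]
  | cons s rest ih =>
    have hs := h s (by simp)
    simp only [csA_loop2, if_pos hs]
    rw [ih (k + 1) (fun x hx => h x (by simp [hx]))]
    simp only [List.length_cons]; omega

-- appending one element to the scanned list
theorem csA_loop2_append (ci x : Int) (t : List Int) (k : Int) :
    csA_loop2 ci (t ++ [x]) k k =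
      if ∀ s ∈ t, ci ≥ s then
        (if ci ≥ x then k + (t.length : Int) + 1 else k + (t.length : Int))
      else csA_loop2 ci t k k := by
  induction t generalizing k with
  | nil => by_cases h : ci ≥ x <;> simp [csA_loop2, h]
  | cons s rest ih =>
    by_cases hs : ci ≥ s
    · simp only [List.cons_append, csA_loop2, if_pos hs]
      rw [ih (k + 1)]
      by_cases hr : ∀ y ∈ rest, ci ≥ y
      · have : ∀ y ∈ s :: rest, ci ≥ y := by
          intro y hy; rcases List.mem_cons.mp hy with h | h
          · exact h ▸ hs
          · exact hr y h
        simp only [if_pos hr, if_pos this]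
        by_cases hx : ci ≥ x <;> simp [hx, List.length_cons] <;> push_cast <;> ring
      · have : ¬ ∀ y ∈ s :: rest, ci ≥ y := by
          intro hall; exact hr (fun y hy => hall y (by simp [hy]))
        simp only [if_neg hr, if_neg this]
    · have : ¬ ∀ y ∈ s :: rest, ci ≥ y := by
        intro hall; exact hs (hall s (by simp))
      simp [csA_loop2, hs]


-- main invariant: B's fused fold tracks (A's fold, csA_loop2 of the accumulated starts)
theorem cs_fold_inv (frames : List Int) (ci : Int) (l : List Int) :
    ∀ (starts : List Int) (seq : Int), starts ≠ [] →
      (∀ j ∈ l, ∀ s ∈ starts, s < j) → l.Pairwise (· < ·) →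
      l.foldl (fun st i =>
          if PySem.List.pyGetD frames i 0 ≠ PySem.List.pyGetD frames (i - 1) 0 ∧
             PySem.List.pyGetD frames i 0 ≠ PySem.List.pyGetD frames (i - 1) 0 + 1 then
            (st.1 + 1, if i ≤ ci then st.2 + 1 else st.2)
          else st)
        (seq, csA_loop2 ci (starts.drop 1) 1 1) =
      (((l.foldl (fun st i =>
          if PySem.List.pyGetD frames i 0 ≠ PySem.List.pyGetD frames (i - 1) 0 ∧
             PySem.List.pyGetD frames i 0 ≠ PySem.List.pyGetD frames (i - 1) 0 + 1 then
            (st.1 + 1, st.2 ++ [i])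
          else st) (seq, starts)).1),
        csA_loop2 ci ((l.foldl (fun st i =>
          if PySem.List.pyGetD frames i 0 ≠ PySem.List.pyGetD frames (i - 1) 0 ∧
             PySem.List.pyGetD frames i 0 ≠ PySem.List.pyGetD frames (i - 1) 0 + 1 then
            (st.1 + 1, st.2 ++ [i])
          else st) (seq, starts)).2.drop 1) 1 1) := by
  induction l with
  | nil => intro starts seq _ _ _; simp
  | cons j l' ih =>
    intro starts seq hne hlt hpw
    simp only [List.foldl_cons]
    by_cases hbr : PySem.List.pyGetD frames j 0 ≠ PySem.List.pyGetD frames (j - 1) 0 ∧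
        PySem.List.pyGetD frames j 0 ≠ PySem.List.pyGetD frames (j - 1) 0 + 1
    · simp only [if_pos hbr]
      have hdrop : (starts ++ [j]).drop 1 = starts.drop 1 ++ [j] := by
        cases starts with
        | nil => exact absurd rfl hne
        | cons a t => simp
      have hstep : (if j ≤ ci then csA_loop2 ci (starts.drop 1) 1 1 + 1
            else csA_loop2 ci (starts.drop 1) 1 1) =
          csA_loop2 ci ((starts ++ [j]).drop 1) 1 1 := by
        rw [hdrop, csA_loop2_append ci j (starts.drop 1) 1]
        by_cases hj : j ≤ ci
        · have hall : ∀ s ∈ starts.drop 1, ci ≥ s := by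
            intro s hs
            have := hlt j (by simp) s (List.mem_of_mem_drop hs)
            omega
          rw [csA_loop2_all ci (starts.drop 1) 1 hall]
          simp only [if_pos hall, if_pos (show ci ≥ j by omega)]
        · by_cases hall : ∀ s ∈ starts.drop 1, ci ≥ s
          · rw [csA_loop2_all ci (starts.drop 1) 1 hall]
            simp only [if_pos hall, if_neg (show ¬ ci ≥ j by omega)]
          · simp only [if_neg hall, if_neg hj]
      rw [hstep]
      exact ih (starts ++ [j]) (seq + 1) (by simp)
        (by
          intro j' hj' s hs
          rcases List.mem_append.mp hs with h | h
          · exact hlt j' (by simp [hj']) s h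
          · have : j < j' := (List.pairwise_cons.mp hpw).1 j' hj'
            simp at h; omega)
        (List.pairwise_cons.mp hpw).2
    · simp only [if_neg hbr]
      exact ih starts seq hne
        (fun j' hj' s hs => hlt j' (by simp [hj']) s hs)
        (List.pairwise_cons.mp hpw).2

-- ===== VERDICT (by name: the statement is the Claim_ definition above) =====
theorem count_sequences_and_get_current_sequence_spec : Claim_equal_count_sequences_and_get_current_sequence := by
  intro frames ci _
  unfold Spec_count_sequences_and_get_current_sequence
  unfold count_sequences_and_get_current_sequence count_sequences_and_get_current_sequence_alt csA_loop1
  have h := cs_fold_inv frames ci (PySem.List.pyRange 1 (frames.length : Int) 1) [0] 1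
    (by simp)
    (by
      intro j hj s hs
      have := (PySem.List.mem_pyRange_one.mp hj).1
      simp at hs; omega)
    (PySem.List.pairwise_lt_pyRange_one 1 (frames.length : Int))
  simpa [csA_loop2] using h.symm
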